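-- pv_equiv track=rewrite | github.com/lialiw/Computational-Optimization-course-MSc-AIDA | week_02_lialiw_B.py | create_CSC
-- ===== SOURCE A (Python) =====
-- def create_CSC(matrixA):
--
--     Anz, JA, IA = [], [], []
--     numRows, numCols = len(matrixA), len(matrixA[0])
--     nz=1 #non zero elements of matrix
--     for j in range(numCols):
--         IA.append(nz)
--         for i in range(numRows):
--             if matrixA[i][j]!=0:
--                 Anz.append(matrixA[i][j])
--                 JA.append(j)
--                 nz+=1
--     IA.append( len(Anz)+1 )
--
--     return Anz, JA, IA
-- ===== SOURCE B (Python) =====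
-- def create_CSC(matrixA):
--     numCols = len(matrixA[0])
--     rows = [row[:numCols] for row in matrixA]
--     # transpose by peeling: repeatedly take the first element of every row
--     colsT = []
--     while rows and rows[0]:
--         colsT.append([r[0] for r in rows])
--         rows = [r[1:] for r in rows]
--     Anz, JA, IA = [], [], [1]
--     for j, col in enumerate(colsT):
--         nz = [v for v in col if v != 0]
--         Anz += nz
--         JA += [j] * len(nz)
--         IA.append(IA[-1] + len(nz))
--     return Anz, JA, IA
-- ===== Notes on version B (the rewrite author's own statement) =====
-- stated objective: alternative
-- what changed: B never indexes the matrix: it transposes the (truncated) matrix by structurally peeling the first element off every row, then emits Anz/JA/IA from the transposed columns with a prefix-sum pass, instead of A's doubly-indexed column-major scan with a running nz counter.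
import Mathlib
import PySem

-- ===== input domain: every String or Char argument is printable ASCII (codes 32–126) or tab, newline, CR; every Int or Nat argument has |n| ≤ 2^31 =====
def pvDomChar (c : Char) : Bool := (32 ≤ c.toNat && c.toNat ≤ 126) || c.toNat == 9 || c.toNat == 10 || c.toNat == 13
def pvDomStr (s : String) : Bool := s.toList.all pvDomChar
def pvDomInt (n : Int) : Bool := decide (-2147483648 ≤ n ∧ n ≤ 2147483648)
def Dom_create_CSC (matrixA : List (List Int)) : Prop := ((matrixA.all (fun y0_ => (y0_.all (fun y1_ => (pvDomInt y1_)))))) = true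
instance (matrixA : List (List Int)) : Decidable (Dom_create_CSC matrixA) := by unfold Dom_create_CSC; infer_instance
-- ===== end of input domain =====

-- B transposes the matrix by structurally peeling the first element off every row (no index
-- arithmetic into the matrix), then emits Anz/JA/IA from the transposed columns with a
-- prefix-sum pass, instead of A's doubly-indexed column-major scan with a running nz counter.

-- ===== PORT A =====
def create_CSC (matrixA : List (List Int)) : List Int × List Int × List Int :=
  let numRows : Int := (matrixA.length : Int)
  let numCols : Int := (((PySem.List.pyGet? matrixA 0).getD []).length : Int)
  let st :=
    (PySem.List.pyRange 0 numCols 1).foldl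
      (fun (st : List Int × List Int × List Int × Int) j =>
        let ia := st.2.2.1 ++ [st.2.2.2]
        let inner :=
          (PySem.List.pyRange 0 numRows 1).foldl
            (fun (s : List Int × List Int × Int) i =>
              if (PySem.List.pyGet? ((PySem.List.pyGet? matrixA i).getD []) j).getD 0 ≠ 0 then
                (s.1 ++ [(PySem.List.pyGet? ((PySem.List.pyGet? matrixA i).getD []) j).getD 0],
                 s.2.1 ++ [j], s.2.2 + 1)
              else s)
            (st.1, st.2.1, st.2.2.2)
        (inner.1, inner.2.1, ia, inner.2.2))
      ([], [], [], 1)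
  (st.1, st.2.1, st.2.2.1 ++ [(st.1.length : Int) + 1])

-- ===== PORT B =====
-- the 'while rows and rows[0]:' peeling loop of Source B; terminates because each step shortens row 0
def pvPeel (rows : List (List Int)) : List (List Int) :=
  if h : rows ≠ [] ∧ rows.headD [] ≠ [] then
    rows.map (fun r => (PySem.List.pyGet? r 0).getD 0) ::
      pvPeel (rows.map (fun r => PySem.List.slice r (some 1) none))
  else []
termination_by (rows.headD []).length
decreasing_by
  cases rows with
  | nil => exact absurd rfl h.1
  | cons r rs =>
    simp only [List.headD_cons, List.map_cons, PySem.List.slice_from_one]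
    have : r ≠ [] := h.2
    cases r with
    | nil => exact absurd rfl this
    | cons x xs => simp

def create_CSC_alt (matrixA : List (List Int)) : List Int × List Int × List Int :=
  let numCols : Int := (((PySem.List.pyGet? matrixA 0).getD []).length : Int)
  let rows := matrixA.map (fun row => PySem.List.slice row none (some numCols))
  let colsT := pvPeel rows
  let st :=
    (PySem.List.enumerate colsT 0).foldl
      (fun (st : List Int × List Int × List Int) p =>
        let nz := p.2.filter (fun v => v != 0)
        (st.1 ++ nz,
         st.2.1 ++ nz.map (fun _ => p.1),
         st.2.2 ++ [(PySem.List.pyGet? st.2.2 (-1)).getD 0 + (nz.length : Int)]))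
      ([], [], [1])
  st

-- ===== PRECONDITION & SPEC =====
-- Pre_ excludes exactly the inputs where Python A raises IndexError: the empty matrix
-- (len(matrixA[0])) and matrices with a row shorter than the first row (matrixA[i][j]).
def Pre_create_CSC (matrixA : List (List Int)) : Prop :=
  matrixA ≠ [] ∧ ∀ row ∈ matrixA, (matrixA.headD []).length ≤ row.length
instance (matrixA : List (List Int)) : Decidable (Pre_create_CSC matrixA) := by unfold Pre_create_CSC; infer_instance
def pvWitness_create_CSC : List (List Int) := [[1, 0], [0, 2]]

def Spec_create_CSC (matrixA : List (List Int)) (out : List Int × List Int × List Int) : Prop := out = create_CSC_alt matrixA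
instance (matrixA : List (List Int)) (out : List Int × List Int × List Int) : Decidable (Spec_create_CSC matrixA out) := by unfold Spec_create_CSC; infer_instance

-- ===== CLAIM (what is proved, stated in full; the proofs are below) =====
def Claim_equal_create_CSC : Prop := ∀ (matrixA : List (List Int)), Dom_create_CSC matrixA → Pre_create_CSC matrixA → Spec_create_CSC matrixA (create_CSC matrixA)

-- ===== LEMMAS AND PROOFS =====

-- the nonzero entries of column j, in row order (A's inner loop computes exactly this)
def pvCol (matrixA : List (List Int)) (j : Int) : List Int :=
  (PySem.List.pyRange 0 (matrixA.length : Int) 1).filterMap (fun i =>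
    if (PySem.List.pyGet? ((PySem.List.pyGet? matrixA i).getD []) j).getD 0 ≠ 0 then
      some ((PySem.List.pyGet? ((PySem.List.pyGet? matrixA i).getD []) j).getD 0)
    else none)

def pvSumLen (cs : List (List Int)) : Int := (cs.map (fun c => (c.length : Int))).sum

def pvIaFrom (n : Int) (cs : List (List Int)) : List Int :=
  match cs with
  | [] => []
  | c :: cs => n :: pvIaFrom (n + (c.length : Int)) cs

lemma pvInnerA (matrixA : List (List Int)) (j : Int) (l : List Int) (a b : List Int) (n : Int) :
    l.foldl
      (fun (s : List Int × List Int × Int) i =>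
        if (PySem.List.pyGet? ((PySem.List.pyGet? matrixA i).getD []) j).getD 0 ≠ 0 then
          (s.1 ++ [(PySem.List.pyGet? ((PySem.List.pyGet? matrixA i).getD []) j).getD 0],
           s.2.1 ++ [j], s.2.2 + 1)
        else s)
      (a, b, n)
    = (a ++ l.filterMap (fun i =>
          if (PySem.List.pyGet? ((PySem.List.pyGet? matrixA i).getD []) j).getD 0 ≠ 0 then
            some ((PySem.List.pyGet? ((PySem.List.pyGet? matrixA i).getD []) j).getD 0)
          else none),
       b ++ (l.filterMap (fun i =>
          if (PySem.List.pyGet? ((PySem.List.pyGet? matrixA i).getD []) j).getD 0 ≠ 0 then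
            some ((PySem.List.pyGet? ((PySem.List.pyGet? matrixA i).getD []) j).getD 0)
          else none)).map (fun _ => j),
       n + (((l.filterMap (fun i =>
          if (PySem.List.pyGet? ((PySem.List.pyGet? matrixA i).getD []) j).getD 0 ≠ 0 then
            some ((PySem.List.pyGet? ((PySem.List.pyGet? matrixA i).getD []) j).getD 0)
          else none)).length : Int))) := by
  induction l generalizing a b n with
  | nil => simp
  | cons x xs ih =>
    simp only [List.foldl_cons, List.filterMap_cons]
    by_cases h : (PySem.List.pyGet? ((PySem.List.pyGet? matrixA x).getD []) j).getD 0 ≠ 0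
    · rw [if_pos h, if_pos h, ih]
      simp only [Prod.mk.injEq]
      refine ⟨by simp [List.append_assoc], by simp [List.append_assoc], by simp only [List.length_cons]; push_cast; ring⟩
    · rw [if_neg h, if_neg h, ih]

lemma pvOuterA (matrixA : List (List Int)) (js : List Int) (a b ia : List Int) (n : Int) :
    js.foldl
      (fun (st : List Int × List Int × List Int × Int) j =>
        let ia := st.2.2.1 ++ [st.2.2.2]
        let inner :=
          (PySem.List.pyRange 0 (matrixA.length : Int) 1).foldl
            (fun (s : List Int × List Int × Int) i =>
              if (PySem.List.pyGet? ((PySem.List.pyGet? matrixA i).getD []) j).getD 0 ≠ 0 then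
                (s.1 ++ [(PySem.List.pyGet? ((PySem.List.pyGet? matrixA i).getD []) j).getD 0],
                 s.2.1 ++ [j], s.2.2 + 1)
              else s)
            (st.1, st.2.1, st.2.2.2)
        (inner.1, inner.2.1, ia, inner.2.2))
      (a, b, ia, n)
    = (a ++ (js.map (pvCol matrixA)).flatMap (fun c => c),
       b ++ js.flatMap (fun j => (pvCol matrixA j).map (fun _ => j)),
       ia ++ pvIaFrom n (js.map (pvCol matrixA)),
       n + pvSumLen (js.map (pvCol matrixA))) := by
  induction js generalizing a b ia n with
  | nil => simp [pvSumLen, pvIaFrom]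
  | cons j js ih =>
    simp only [List.foldl_cons]
    rw [pvInnerA]
    rw [ih]
    simp [pvCol, pvSumLen, pvIaFrom, List.append_assoc]
    omega

lemma pvLenFlat (cs : List (List Int)) : ((cs.flatMap (fun c => c)).length : Int) = pvSumLen cs := by
  induction cs with
  | nil => simp [pvSumLen]
  | cons c cs ih => simp [pvSumLen] at *; omega

-- B's fold over (index, column) pairs, with the IA tail isolated as 'ia ++ [n]'
lemma pvFoldB (ps : List (Int × List Int)) (a b ia : List Int) (n : Int) :
    ps.foldl
      (fun (st : List Int × List Int × List Int) p =>
        let nz := p.2.filter (fun v => v != 0)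
        (st.1 ++ nz,
         st.2.1 ++ nz.map (fun _ => p.1),
         st.2.2 ++ [(PySem.List.pyGet? st.2.2 (-1)).getD 0 + (nz.length : Int)]))
      (a, b, ia ++ [n])
    = (a ++ ps.flatMap (fun p => p.2.filter (fun v => v != 0)),
       b ++ ps.flatMap (fun p => (p.2.filter (fun v => v != 0)).map (fun _ => p.1)),
       ia ++ pvIaFrom n (ps.map (fun p => p.2.filter (fun v => v != 0)))
          ++ [n + pvSumLen (ps.map (fun p => p.2.filter (fun v => v != 0)))]) := by
  induction ps generalizing a b ia n with
  | nil => simp [pvIaFrom, pvSumLen]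
  | cons p ps ih =>
    simp only [List.foldl_cons, PySem.List.pyGet?_neg_one_append_singleton, Option.getD_some]
    rw [show ia ++ [n] ++ [n + ((p.2.filter (fun v => v != 0)).length : Int)]
          = (ia ++ [n]) ++ [n + ((p.2.filter (fun v => v != 0)).length : Int)] by simp]
    rw [ih]
    simp [pvIaFrom, pvSumLen, List.append_assoc]
    ring_nf

-- the j-th column of a row list (kept abstract so simp does not unfold it)
def pvColFn (rows : List (List Int)) (j : Nat) : List Int :=
  rows.map (fun r => (PySem.List.pyGet? r (j : Int)).getD 0)

-- peeling a nonempty list of rows, all of length n, yields the n columns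
lemma pvPeel_eq (n : Nat) (rows : List (List Int)) (hne : rows ≠ [])
    (hlen : ∀ r ∈ rows, r.length = n) :
    pvPeel rows = (List.range n).map (pvColFn rows) := by
  induction n generalizing rows with
  | zero =>
    have hhd : rows.headD [] = [] := by
      cases rows with
      | nil => rfl
      | cons r rs => exact List.eq_nil_of_length_eq_zero (hlen r (by simp))
    rw [pvPeel, dif_neg (fun hc => hc.2 hhd)]
    simp
  | succ m ih =>
    have hhd : rows.headD [] ≠ [] := by
      cases rows with
      | nil => exact absurd rfl hne
      | cons r rs =>
        simp only [List.headD_cons]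
        intro h; have := hlen r (by simp); rw [h] at this; simp at this
    rw [pvPeel, dif_pos ⟨hne, hhd⟩]
    have htails : ∀ r ∈ rows.map (fun r => PySem.List.slice r (some 1) none), r.length = m := by
      intro r hr
      simp only [List.mem_map] at hr
      obtain ⟨r0, hr0, rfl⟩ := hr
      have := hlen r0 hr0
      simp [PySem.List.slice_from_one, this]
    have hne' : rows.map (fun r => PySem.List.slice r (some 1) none) ≠ [] := by
      cases rows with
      | nil => exact absurd rfl hne
      | cons r rs => simp
    rw [ih _ hne' htails, List.range_succ_eq_map, List.map_cons, List.map_map]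
    congr 1
    unfold pvColFn
    simp only [List.map_map, Function.comp_apply, PySem.List.pyGet?_natCast]
    apply List.map_congr_left
    intro j hj
    apply List.map_congr_left
    intro r hr
    simp [Function.comp_apply, PySem.List.slice_from_one, List.getElem?_tail, Nat.succ_eq_add_one]

-- filtering a mapped list vs. filterMap with an if
lemma pvFilterMapEq (l : List (List Int)) (f : List Int → Int) :
    (l.map f).filter (fun v => v != 0)
      = l.filterMap (fun x => if f x ≠ 0 then some (f x) else none) := by
  induction l with
  | nil => rfl
  | cons x xs ih =>
    by_cases h : f x ≠ 0
    · simp [List.filter_cons, List.filterMap_cons, h, ih]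
    · simp at h; simp [List.filter_cons, List.filterMap_cons, h, ih]

lemma pvFilterMapCongr {α β : Type} (l : List α) (f g : α → Option β)
    (h : ∀ x ∈ l, f x = g x) : l.filterMap f = l.filterMap g := by
  induction l with
  | nil => rfl
  | cons x xs ih =>
    simp only [List.filterMap_cons, h x (by simp), ih (fun y hy => h y (by simp [hy]))]

lemma pvFlatMapCongr {α β : Type} (l : List α) (f g : α → List β)
    (h : ∀ x ∈ l, f x = g x) : l.flatMap f = l.flatMap g := by
  induction l with
  | nil => rfl
  | cons x xs ih =>
    simp only [List.flatMap_cons, h x (by simp), ih (fun y hy => h y (by simp [hy]))]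

-- head access of a nonempty list
lemma pvGetHead (matrixA : List (List Int)) (hne : matrixA ≠ []) :
    (PySem.List.pyGet? matrixA 0).getD [] = matrixA.headD [] := by
  cases matrixA with
  | nil => exact absurd rfl hne
  | cons r rs => simp [PySem.List.pyGet?, PySem.List.pyIdx?]

-- 'for i in range(len(l)): … l[i] …' as a filterMap over l itself
lemma pvFilterMapIndex {β : Type} (l : List (List Int)) (h : List Int → Option β) :
    (PySem.List.pyRange 0 (l.length : Int) 1).filterMap
        (fun i => h ((PySem.List.pyGet? l i).getD []))
      = l.filterMap h := by
  have hm : (PySem.List.pyRange 0 ((l.length : Nat) : Int) 1).map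
      (fun i => (PySem.List.pyGet? l i).getD []) = l :=
    PySem.List.map_pyGetD_pyRange_zero (xs := l) (d := ([] : List Int))
  conv_rhs => rw [← hm]
  rw [List.filterMap_map]
  rfl

-- the filtered j-th column of the truncated rows is exactly A's pvCol
lemma pvColKey (matrixA : List (List Int)) (n k : Nat) (hk : k < n) :
    (pvColFn (matrixA.map (fun row => PySem.List.slice row none (some (n : Int)))) k).filter
        (fun v => v != 0)
      = pvCol matrixA (k : Int) := by
  unfold pvColFn pvCol
  rw [List.map_map, pvFilterMapEq,
      pvFilterMapIndex matrixA (fun row =>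
        if (PySem.List.pyGet? row ((k : Nat) : Int)).getD 0 ≠ 0 then
          some ((PySem.List.pyGet? row ((k : Nat) : Int)).getD 0) else none)]
  apply pvFilterMapCongr
  intro row hrow
  simp only [Function.comp_apply, PySem.List.slice_to_natCast, PySem.List.pyGet?_natCast,
      List.getElem?_take_of_lt hk]

-- enumerate over a mapped range
lemma pvEnumMapRange {α : Type} (g : Nat → α) (n : Nat) (s : Int) :
    PySem.List.enumerate ((List.range n).map g) s
      = (List.range n).map (fun (k : Nat) => ((s + k : Int), g k)) := by
  induction n generalizing s with
  | zero => simp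
  | succ m ih =>
    rw [List.range_succ, List.map_append, PySem.List.enumerate_append, ih]
    simp

-- pyRange over naturals is a mapped List.range
lemma pvRangeNat (n : Nat) :
    PySem.List.pyRange 0 ((n : Nat) : Int) 1 = (List.range n).map (fun (k : Nat) => ((k : Nat) : Int)) := by
  rw [PySem.List.pyRange_one]; simp

-- ===== VERDICT (by name: the statement is the Claim_ definition above) =====
theorem create_CSC_spec : Claim_equal_create_CSC := by
  intro matrixA _ hpre
  obtain ⟨hne, hrowsge⟩ := hpre
  unfold Spec_create_CSC create_CSC create_CSC_alt
  simp only []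
  rw [pvOuterA matrixA _ [] [] [] 1, pvGetHead matrixA hne]
  set n : Nat := (matrixA.headD []).length with hn
  have hrows' : ∀ row ∈ matrixA, n ≤ row.length := fun row hrow => hrowsge row hrow
  have hlen_t : ∀ r ∈ matrixA.map (fun row => PySem.List.slice row none (some (n : Int))),
      r.length = n := by
    intro r hr
    simp only [List.mem_map] at hr
    obtain ⟨row, hrow, rfl⟩ := hr
    rw [PySem.List.slice_to_natCast, List.length_take]
    exact Nat.min_eq_left (hrows' row hrow)
  have hne_t : matrixA.map (fun row => PySem.List.slice row none (some (n : Int))) ≠ [] := by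
    cases matrixA with
    | nil => exact absurd rfl hne
    | cons r rs => simp
  rw [pvPeel_eq n _ hne_t hlen_t, pvEnumMapRange, pvRangeNat]
  rw [show ([1] : List Int) = [] ++ [1] from rfl, pvFoldB]
  have hkey : ∀ k ∈ List.range n,
      ((fun (k : Nat) => ((0 + k : Int),
          pvColFn (matrixA.map (fun row => PySem.List.slice row none (some (n : Int)))) k)) k).2.filter
        (fun v => v != 0)
      = pvCol matrixA (k : Int) := by
    intro k hk
    exact pvColKey matrixA n k (List.mem_range.mp hk)
  have hcs : ((List.range n).map (fun (k : Nat) =>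
        ((0 + k : Int),
         pvColFn (matrixA.map (fun row => PySem.List.slice row none (some (n : Int)))) k))).map
          (fun p => p.2.filter (fun v => v != 0))
      = ((List.range n).map (fun (k : Nat) => ((k : Nat) : Int))).map (pvCol matrixA) := by
    rw [List.map_map, List.map_map]
    apply List.map_congr_left
    intro k hk
    simp only [Function.comp_apply]
    exact hkey k hk
  simp only [List.nil_append, Prod.mk.injEq]
  refine ⟨?_, ?_, ?_⟩
  · simp only [List.flatMap_map]
    apply pvFlatMapCongr
    intro k hk
    simpa using (hkey k hk).symm
  · simp only [List.flatMap_map]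
    apply pvFlatMapCongr
    intro k hk
    have := hkey k hk
    simp only [Function.comp_apply] at this ⊢
    rw [this]
    simp
  · rw [hcs]
    congr 1
    congr 1
    rw [pvLenFlat]
    omega
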